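-- pv_equiv track=rewrite | github.com/Athenais-Zhang/decisionTree_Distance | DTforSeq_04_distance/tools.py | rankDistance
-- ===== SOURCE A (Python) =====
-- def rankDistance(s1, s2):
--     u1 = {}
--     u2 = {}
--     for index in range(len(s1)):
--         if s1[index] not in u1:
--             u1[s1[index]] = []
--         u1[s1[index]].append(index + 1)
--
--     for index in range(len(s2)):
--         if s2[index] not in u2:
--             u2[s2[index]] = []
--         u2[s2[index]].append(index + 1)
--
--     dis = 0
--     for item in u1:
--         if item not in u2:
--             for pos in u1[item]:
--                 dis += pos
--         else:
--             p1 = u1[item]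
--             p2 = u2[item]
--             len1 = len(p1)
--             len2 = len(p2)
--             if len1 > len2:
--                 for index in range(len2):
--                     dis += abs(p1[index] - p2[index])
--                 for index in range(len2, len1):
--                     dis += p1[index]
--             else:
--                 for index in range(len1):
--                     dis += abs(p1[index] - p2[index])
--                 for index in range(len1, len2):
--                     dis += p2[index]
--             u2.pop(item)
--     for item in u2:
--         for pos in u2[item]:
--             dis += pos
--     return dis
-- ===== SOURCE B (Python) =====
-- def rankDistance(s1, s2):
--     # Identity: for matched k-th occurrences |p1-p2| = p1+p2-2*min(p1,p2), and unmatched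
--     # occurrences contribute their own position; so the distance is the sum of ALL 1-based
--     # positions of both sequences (two triangular numbers, closed form) minus twice the sum
--     # of min(p1, p2) over matched occurrence pairs, collected in one pass over s2.
--     pos1 = {}
--     for i, x in enumerate(s1):
--         pos1.setdefault(x, []).append(i + 1)
--     n1, n2 = len(s1), len(s2)
--     total = n1 * (n1 + 1) // 2 + n2 * (n2 + 1) // 2
--     seen = {}
--     for i, x in enumerate(s2):
--         r = seen.get(x, 0)
--         seen[x] = r + 1
--         ps = pos1.get(x, ())
--         if r < len(ps):
--             total -= 2 * min(ps[r], i + 1)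
--     return total
-- ===== Notes on version B (the rewrite author's own statement) =====
-- stated objective: simpler
-- what changed: B replaces A's per-symbol matching of position lists (abs differences over the common prefix, leftover loops for unmatched occurrences and for symbols only in s2) by the identity |p1-p2| = p1+p2-2*min(p1,p2): the answer is two closed-form triangular numbers n(n+1)/2 minus twice a sum of min(matched positions) collected in a single pass over s2 with a per-symbol occurrence counter.
import Mathlib
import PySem

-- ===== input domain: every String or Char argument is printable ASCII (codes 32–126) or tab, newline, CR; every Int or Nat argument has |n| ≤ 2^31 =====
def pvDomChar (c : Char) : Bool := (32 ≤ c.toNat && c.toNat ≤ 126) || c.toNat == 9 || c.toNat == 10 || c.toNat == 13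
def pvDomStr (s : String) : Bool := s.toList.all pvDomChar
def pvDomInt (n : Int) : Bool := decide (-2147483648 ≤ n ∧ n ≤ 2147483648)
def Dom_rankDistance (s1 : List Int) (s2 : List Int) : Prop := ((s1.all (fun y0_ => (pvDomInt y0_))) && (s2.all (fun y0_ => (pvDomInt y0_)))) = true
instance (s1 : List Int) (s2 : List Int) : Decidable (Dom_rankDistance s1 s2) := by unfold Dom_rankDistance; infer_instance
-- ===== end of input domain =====

-- B computes the same distance by the identity |p1-p2| = p1+p2-2*min(p1,p2): two closed-form
-- triangular numbers minus twice a sum of mins collected in a single pass over s2, replacing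
-- A's per-symbol abs/leftover branch analysis and its second leftover loop (objective: simpler).

-- ===== PORT A =====
-- A-side helpers: the loops of A, named so the port stays a line-by-line transliteration.
def pvBuildA (s : List Int) : PySem.Dict Int (List Int) :=
  (PySem.List.pyRange 0 (PySem.List.len s)).foldl
    (fun u index => u.modify (PySem.List.pyGetD s index 0) [] (fun l => l ++ [index + 1]))
    PySem.Dict.empty

def pvSumInto (dis : Int) (l : List Int) : Int :=
  l.foldl (fun dis pos => dis + pos) dis

def pvStepA (u1 : PySem.Dict Int (List Int)) (st : Int × PySem.Dict Int (List Int)) (item : Int) :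
    Int × PySem.Dict Int (List Int) :=
  if st.2.contains item = false then
    (pvSumInto st.1 (u1.getD item []), st.2)
  else
    let p1 := u1.getD item []
    let p2 := st.2.getD item []
    let len1 := PySem.List.len p1
    let len2 := PySem.List.len p2
    let dis :=
      if len1 > len2 then
        let dis := (PySem.List.pyRange 0 len2).foldl
          (fun dis index => dis + |PySem.List.pyGetD p1 index 0 - PySem.List.pyGetD p2 index 0|) st.1
        (PySem.List.pyRange len2 len1).foldl
          (fun dis index => dis + PySem.List.pyGetD p1 index 0) dis
      else
        let dis := (PySem.List.pyRange 0 len1).foldl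
          (fun dis index => dis + |PySem.List.pyGetD p1 index 0 - PySem.List.pyGetD p2 index 0|) st.1
        (PySem.List.pyRange len1 len2).foldl
          (fun dis index => dis + PySem.List.pyGetD p2 index 0) dis
    (dis, st.2.erase item)

def rankDistance (s1 : List Int) (s2 : List Int) : Int :=
  let u1 := pvBuildA s1
  let u2 := pvBuildA s2
  let st := u1.keys.foldl (pvStepA u1) (0, u2)
  st.2.keys.foldl (fun dis item => pvSumInto dis (st.2.getD item [])) st.1

-- ===== PORT B =====
-- B-side helpers: Source B's pos1-building loop and the body of its single pass over s2.
def pvBuildB (s : List Int) : PySem.Dict Int (List Int) :=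
  (PySem.List.enumerate s).foldl
    (fun d ix => d.modify ix.2 [] (fun l => l ++ [ix.1 + 1])) PySem.Dict.empty

def pvStepB (pos1 : PySem.Dict Int (List Int)) (st : PySem.Dict Int Int × Int) (ix : Int × Int) :
    PySem.Dict Int Int × Int :=
  let r := st.1.getD ix.2 0
  let seen := st.1.insert ix.2 (r + 1)
  let ps := pos1.getD ix.2 []
  if r < PySem.List.len ps then
    (seen, st.2 - 2 * min (PySem.List.pyGetD ps r 0) (ix.1 + 1))
  else
    (seen, st.2)

def rankDistance_alt (s1 : List Int) (s2 : List Int) : Int :=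
  let pos1 := pvBuildB s1
  let n1 := PySem.List.len s1
  let n2 := PySem.List.len s2
  let total := PySem.Int.floordiv (n1 * (n1 + 1)) 2 + PySem.Int.floordiv (n2 * (n2 + 1)) 2
  ((PySem.List.enumerate s2).foldl (pvStepB pos1) (PySem.Dict.empty, total)).2

-- ===== PRECONDITION & SPEC =====
def Spec_rankDistance (s1 : List Int) (s2 : List Int) (out : Int) : Prop := out = rankDistance_alt s1 s2
instance (s1 : List Int) (s2 : List Int) (out : Int) : Decidable (Spec_rankDistance s1 s2 out) := by unfold Spec_rankDistance; infer_instance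

-- ===== CLAIM (what is proved, stated in full; the proofs are below) =====
def Claim_equal_rankDistance : Prop := ∀ (s1 : List Int) (s2 : List Int), Dom_rankDistance s1 s2 → Spec_rankDistance s1 s2 (rankDistance s1 s2)

-- ===== LEMMAS AND PROOFS =====

-- |a - b| = a + b - 2*min a b, the identity B is built on
theorem pvAbsSub (a b : Int) : |a - b| = a + b - 2 * min a b := by
  rcases le_total a b with h | h
  · rw [abs_of_nonpos (by omega), min_eq_left h]; ring
  · rw [abs_of_nonneg (by omega), min_eq_right h]; ring

-- 1-indexed positions of symbol c in s (the list both builds keep per symbol)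
def pvOcc (c : Int) (s : List Int) : List Int :=
  ((PySem.List.enumerate s).filter (fun p => p.2 == c)).map (fun p => p.1 + 1)

theorem pvOcc_append (c y : Int) (s : List Int) :
    pvOcc c (s ++ [y]) = pvOcc c s ++ (if y = c then [(s.length : Int) + 1] else []) := by
  unfold pvOcc
  rw [PySem.List.enumerate_append, List.filter_append, List.map_append]
  congr 1
  simp [PySem.List.enumerate]
  by_cases h : y = c <;> simp [h]

theorem pvOcc_length (c : Int) (s : List Int) : (pvOcc c s).length = s.count c := by
  unfold pvOcc
  rw [List.length_map, ← List.countP_eq_length_filter]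
  induction s using List.reverseRecOn with
  | nil => simp [PySem.List.enumerate]
  | append_singleton s y ih =>
      rw [PySem.List.enumerate_append, List.countP_append, List.count_append, ih]
      simp [PySem.List.enumerate]
      by_cases h : y = c <;> simp [h]

theorem pvOcc_eq_nil_of_not_mem (c : Int) (s : List Int) (h : c ∉ s) : pvOcc c s = [] := by
  have hl := pvOcc_length c s
  rw [List.count_eq_zero_of_not_mem h] at hl
  exact List.eq_nil_of_length_eq_zero hl

-- triangular numbers
def pvTri : Nat → Int
  | 0 => 0
  | n + 1 => pvTri n + (n + 1)

theorem pvTri_floordiv (n : Nat) :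
    PySem.Int.floordiv ((n : Int) * ((n : Int) + 1)) 2 = pvTri n := by
  rw [PySem.Int.floordiv_eq_ediv_of_pos (by norm_num)]
  induction n with
  | zero => simp [pvTri]
  | succ m ih =>
      rw [pvTri, ← ih]; push_cast
      have h : ((m:Int)+1)*((m:Int)+1+1) = (m:Int)*((m:Int)+1) + 2*((m:Int)+1) := by ring
      omega

-- sum of a nodup-list map that is a single spike
theorem pvSum_spike (L : List Int) (y : Int) (v : Int) (hnd : L.Nodup) (hy : y ∈ L) :
    (L.map (fun x => if y = x then v else 0)).sum = v := by
  induction L with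
  | nil => simp at hy
  | cons a t ih =>
      rcases List.mem_cons.mp hy with rfl | hm
      · have hz : ∀ x ∈ t, (if y = x then v else 0) = 0 := by
          intro x hx
          have : y ≠ x := fun e => (List.nodup_cons.mp hnd).1 (e ▸ hx)
          simp [this]
        simp [List.map_congr_left hz]
      · have hne : y ≠ a := fun e => (List.nodup_cons.mp hnd).1 (e ▸ hm)
        simp [hne, ih (List.nodup_cons.mp hnd).2 hm]

-- summing the per-symbol position lists over any nodup superset of the symbols gives tri(n)
theorem pvSumOcc (s : List Int) : ∀ (L : List Int), L.Nodup → (∀ y ∈ s, y ∈ L) →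
    (L.map (fun x => (pvOcc x s).sum)).sum = pvTri s.length := by
  induction s using List.reverseRecOn with
  | nil =>
      intro L _ _
      have hz : ∀ x ∈ L, (pvOcc x []).sum = 0 := by intro x _; simp [pvOcc, PySem.List.enumerate]
      simp [List.map_congr_left hz, pvTri]
  | append_singleton s y ih =>
      intro L hnd hsub
      have hy : y ∈ L := hsub y (by simp)
      have hstep : ∀ x ∈ L, (pvOcc x (s ++ [y])).sum
          = (pvOcc x s).sum + (if y = x then (s.length : Int) + 1 else 0) := by
        intro x _
        rw [pvOcc_append]
        by_cases h : y = x <;> simp [h]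
      rw [List.map_congr_left hstep, PySem.List.sum_map_add_int,
        ih L hnd (fun z hz => hsub z (by simp [hz])), pvSum_spike L y _ hnd hy]
      simp [pvTri]

-- rank-wise sum of minima of two position lists
def pvMinSum (p q : List Int) : Int :=
  ((List.range (min p.length q.length)).map (fun i => min (p.getD i 0) (q.getD i 0))).sum

theorem pvMinSum_nil_left (q : List Int) : pvMinSum [] q = 0 := by
  simp [pvMinSum]

theorem pvMinSum_nil_right (p : List Int) : pvMinSum p [] = 0 := by
  simp [pvMinSum]

theorem pvMinSum_comm (p q : List Int) : pvMinSum p q = pvMinSum q p := by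
  unfold pvMinSum
  rw [Nat.min_comm]
  exact congrArg _ (List.map_congr_left (fun i _ => min_comm _ _))

theorem pvMinSum_append_right (p q : List Int) (v : Int) :
    pvMinSum p (q ++ [v]) =
      pvMinSum p q + (if q.length < p.length then min (p.getD q.length 0) v else 0) := by
  unfold pvMinSum
  by_cases h : q.length < p.length
  · have h1 : min p.length (q ++ [v]).length = q.length + 1 := by simp; omega
    have h2 : min p.length q.length = q.length := by omega
    rw [h1, h2, List.range_succ, List.map_append, List.sum_append, if_pos h]
    congr 1
    · apply congrArg
      apply List.map_congr_left
      intro i hi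
      rw [List.getD_append _ _ _ _ (List.mem_range.mp hi)]
    · simp only [List.map_cons, List.map_nil, List.sum_cons, List.sum_nil, add_zero]
      rw [List.getD_append_right _ _ _ _ (le_refl _)]
      simp
  · have h1 : min p.length (q ++ [v]).length = min p.length q.length := by simp; omega
    have h2 : min p.length q.length ≤ q.length := by omega
    rw [h1, if_neg h, add_zero]
    apply congrArg
    apply List.map_congr_left
    intro i hi
    rw [List.getD_append _ _ _ _ (lt_of_lt_of_le (List.mem_range.mp hi) h2)]

theorem pvSum_range_getD (p : List Int) (m : Nat) (h : m ≤ p.length) :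
    ((List.range m).map (fun k => p.getD k 0)).sum = (p.take m).sum := by
  induction m with
  | zero => simp
  | succ k ih =>
      have hk : k < p.length := h
      rw [List.range_succ, List.map_append, List.sum_append, ih (by omega),
        List.take_add_one, List.getElem?_eq_getElem hk, List.sum_append]
      simp [List.getElem?_eq_getElem hk]

theorem pvSum_abs_split (p q : List Int) (m : Nat) :
    ((List.range m).map (fun k => |p.getD k 0 - q.getD k 0|)).sum
      = ((List.range m).map (fun k => p.getD k 0)).sum
        + ((List.range m).map (fun k => q.getD k 0)).sum
        - 2 * ((List.range m).map (fun k => min (p.getD k 0) (q.getD k 0))).sum := by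
  induction m with
  | zero => simp
  | succ k ih =>
      rw [List.range_succ]
      simp only [List.map_append, List.sum_append, List.map_cons, List.map_nil,
        List.sum_cons, List.sum_nil]
      rw [ih, pvAbsSub]
      ring

theorem pvSum_drop (p : List Int) (m : Nat) (h : m ≤ p.length) :
    ((List.range (p.length - m)).map (fun k => p.getD (m + k) 0)).sum = (p.drop m).sum := by
  have hlen : (p.drop m).length = p.length - m := by simp
  have hcg : ∀ k ∈ List.range (p.length - m), p.getD (m + k) 0 = (p.drop m).getD k 0 := by
    intro k hk
    have hk' : k < p.length - m := List.mem_range.mp hk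
    rw [List.getD_eq_getElem _ _ (by omega), List.getD_eq_getElem _ _ (by omega : k < (p.drop m).length)]
    simp [List.getElem_drop]
  rw [List.map_congr_left hcg, ← hlen, pvSum_range_getD _ _ (le_refl _),
    List.take_of_length_le (le_refl _)]

-- the two range-loops of A's matched branch, as one algebraic value
theorem pvPairLoops (p q : List Int) (h : q.length ≤ p.length) (dis : Int) :
    (PySem.List.pyRange (q.length : Int) (p.length : Int)).foldl
        (fun dis index => dis + PySem.List.pyGetD p index 0)
        ((PySem.List.pyRange 0 (q.length : Int)).foldl
          (fun dis index => dis + |PySem.List.pyGetD p index 0 - PySem.List.pyGetD q index 0|) dis) =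
      dis + (p.sum + q.sum - 2 * pvMinSum p q) := by
  rw [PySem.List.pyRange_zero_natCast, List.foldl_map, PySem.List.pyRange_one, List.foldl_map]
  have hc : ((p.length : Int) - (q.length : Int)).toNat = p.length - q.length := by omega
  rw [hc]
  simp only [← Nat.cast_add, PySem.List.pyGetD_natCast]
  rw [PySem.List.foldl_add, PySem.List.foldl_add, pvSum_abs_split,
    pvSum_drop p q.length h, pvSum_range_getD q q.length (le_refl _),
    pvSum_range_getD p q.length h]
  have hm : min p.length q.length = q.length := by omega
  unfold pvMinSum
  rw [hm]
  have hsplit : (p.take q.length).sum + (p.drop q.length).sum = p.sum := by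
    rw [← List.sum_append, List.take_append_drop]
  simp
  omega

-- both builds are the same dict, characterised by pvOcc
theorem pvBuildB_getD (s : List Int) (c : Int) : (pvBuildB s).getD c [] = pvOcc c s := by
  unfold pvBuildB
  rw [show (PySem.List.enumerate s).foldl
      (fun d ix => d.modify ix.2 [] (fun l => l ++ [ix.1 + 1])) PySem.Dict.empty
    = ((PySem.List.enumerate s).map (fun ix => (ix.2, ix.1 + 1))).foldl
      (fun d p => d.modify p.1 [] (fun l => l ++ [p.2])) PySem.Dict.empty from
    (List.foldl_map (f := fun ix : Int × Int => (ix.2, ix.1 + 1))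
      (g := fun (d : PySem.Dict Int (List Int)) (p : Int × Int) => d.modify p.1 [] fun l => l ++ [p.2])).symm]
  rw [PySem.Dict.getD_foldl_modify_append]
  simp [pvOcc, List.filter_map, List.map_map, Function.comp_def]

theorem pvBuildB_keys (s : List Int) : (pvBuildB s).keys = PySem.Set.ofList s := by
  unfold pvBuildB
  rw [PySem.Dict.keys_foldl_modify_key (PySem.List.enumerate s) (fun ix => ix.2) []
      (fun d ix l => l ++ [ix.1 + 1]) PySem.Dict.empty]
  rw [PySem.List.map_snd_enumerate]
  rfl

theorem pvBuildA_eq (s : List Int) : pvBuildA s = pvBuildB s := by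
  unfold pvBuildA pvBuildB
  rw [PySem.List.enumerate_eq_map_pyRange s 0, List.foldl_map]

-- dict.erase facts (none are provided by the prelude)
theorem pvErase_of_not_contains (d : PySem.Dict Int (List Int)) (k : Int)
    (h : d.contains k = false) : d.erase k = d := by
  have hall : ∀ p ∈ d.items, (!(p.1 == k)) = true := by
    intro p hp
    have hc : d.items.any (fun p => p.1 == k) = false := h
    have := List.any_eq_false.mp hc p hp
    simpa using this
  show PySem.Dict.mk _ = d
  rw [List.filter_eq_self.mpr hall]

theorem pvErase_getD_of_ne (d : PySem.Dict Int (List Int)) (k k' : Int) (h : k' ≠ k) :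
    (d.erase k).getD k' [] = d.getD k' [] := by
  simp only [PySem.Dict.getD, PySem.Dict.get?, PySem.Dict.erase]
  rw [List.find?_filter]
  congr 2
  congr 1
  funext a
  by_cases h2 : a.1 = k' <;> simp [h2, h]

theorem pvEraseFold_items (ks : List Int) : ∀ (d : PySem.Dict Int (List Int)),
    (ks.foldl PySem.Dict.erase d).items = d.items.filter (fun p => !decide (p.1 ∈ ks)) := by
  induction ks with
  | nil => intro d; simp
  | cons a t ih =>
      intro d
      rw [List.foldl_cons, ih]
      show (List.filter _ (d.items.filter _)) = _
      rw [List.filter_filter]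
      congr 1
      funext p
      by_cases h1 : p.1 = a <;> by_cases h2 : p.1 ∈ t <;> simp [h1, h2]

-- per-symbol value of A's main loop body
def pvValA (p q : List Int) : Int := p.sum + q.sum - 2 * pvMinSum p q

theorem pvSumInto_eq (dis : Int) (l : List Int) : pvSumInto dis l = dis + l.sum := by
  unfold pvSumInto
  rw [PySem.List.foldl_add l (fun x => x) dis]
  simp

theorem pvStepA_val (u1 : PySem.Dict Int (List Int)) (dis : Int) (u2 : PySem.Dict Int (List Int)) (item : Int) :
    pvStepA u1 (dis, u2) item = (dis + pvValA (u1.getD item []) (u2.getD item []), u2.erase item) := by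
  unfold pvStepA
  by_cases hc : u2.contains item = false
  · rw [if_pos hc, pvSumInto_eq, PySem.Dict.getD_of_not_contains u2 _ hc,
      pvErase_of_not_contains u2 _ hc]
    simp [pvValA, pvMinSum_nil_right]
  · rw [if_neg hc]
    set p := u1.getD item [] with hp
    set q := u2.getD item [] with hq
    simp only [PySem.List.len_eq]
    by_cases hl : q.length < p.length
    · rw [if_pos (by exact_mod_cast hl), pvPairLoops p q (le_of_lt hl) dis]
      simp [pvValA]
    · rw [if_neg (by exact_mod_cast hl)]
      have habs : ∀ (acc : Int), ∀ x ∈ PySem.List.pyRange 0 (p.length : Int),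
          acc + |PySem.List.pyGetD p x 0 - PySem.List.pyGetD q x 0|
            = acc + |PySem.List.pyGetD q x 0 - PySem.List.pyGetD p x 0| := by
        intro acc x _
        rw [abs_sub_comm]
      rw [PySem.List.foldl_congr_mem _ _ _ _ habs,
        pvPairLoops q p (by omega) dis]
      have : pvValA p q = q.sum + p.sum - 2 * pvMinSum q p := by
        unfold pvValA
        rw [pvMinSum_comm]
        ring
      rw [this]

theorem pvLoopA (u1 : PySem.Dict Int (List Int)) :
    ∀ (ks : List Int), ks.Nodup → ∀ (dis : Int) (u2 : PySem.Dict Int (List Int)),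
      ks.foldl (pvStepA u1) (dis, u2) =
        (dis + (ks.map (fun x => pvValA (u1.getD x []) (u2.getD x []))).sum,
         ks.foldl PySem.Dict.erase u2) := by
  intro ks
  induction ks with
  | nil => intro _ dis u2; simp
  | cons a t ih =>
      intro hnd dis u2
      rw [List.foldl_cons, pvStepA_val, ih (List.nodup_cons.mp hnd).2]
      have hcg : ∀ x ∈ t, pvValA (u1.getD x []) ((u2.erase a).getD x [])
          = pvValA (u1.getD x []) (u2.getD x []) := by
        intro x hx
        have hne : x ≠ a := fun e => (List.nodup_cons.mp hnd).1 (e ▸ hx)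
        rw [pvErase_getD_of_ne u2 a x hne]
      rw [List.foldl_cons]
      simp only [List.map_cons, List.sum_cons, List.map_congr_left hcg]
      congr 1
      ring

-- getD is unchanged by erasing a set of other keys
theorem pvEraseFold_getD (ks : List Int) (d : PySem.Dict Int (List Int)) (x : Int) (hx : x ∉ ks) :
    (ks.foldl PySem.Dict.erase d).getD x [] = d.getD x [] := by
  have hitems := pvEraseFold_items ks d
  simp only [PySem.Dict.getD, PySem.Dict.get?]
  rw [show (ks.foldl PySem.Dict.erase d).items = d.items.filter (fun p => !decide (p.1 ∈ ks)) from hitems,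
    List.find?_filter]
  congr 2
  congr 1
  funext a
  by_cases h2 : a.1 = x <;> simp [h2, hx]

-- map fst commutes with a fst-only filter
theorem pvMapFstFilter (l : List (Int × List Int)) (q : Int → Bool) :
    (l.filter (fun p => q p.1)).map Prod.fst = (l.map Prod.fst).filter q := by
  induction l with
  | nil => simp
  | cons a t ih => by_cases h : q a.1 <;> simp [h, ih]

-- splitting the pvValA sum into its three parts
theorem pvValA_sum (L : List Int) (f g : Int → List Int) :
    (L.map (fun x => pvValA (f x) (g x))).sum
      = (L.map (fun x => (f x).sum)).sum + (L.map (fun x => (g x).sum)).sum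
        - 2 * (L.map (fun x => pvMinSum (f x) (g x))).sum := by
  have : ∀ x ∈ L, pvValA (f x) (g x)
      = (f x).sum + ((g x).sum + (-2) * pvMinSum (f x) (g x)) := by
    intro x _; unfold pvValA; ring
  rw [List.map_congr_left this, PySem.List.sum_map_add_int, PySem.List.sum_map_add_int,
    PySem.List.sum_map_const_mul_int]
  ring

-- A's total, reduced to sums over the two key sets
theorem pvA_eq (s1 s2 : List Int) :
    rankDistance s1 s2 =
      ((PySem.Set.ofList s1).map (fun x => (pvOcc x s1).sum)).sum
      + ((PySem.Set.ofList s1 ++ (PySem.Set.ofList s2).filter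
            (fun x => !decide (x ∈ PySem.Set.ofList s1))).map (fun x => (pvOcc x s2).sum)).sum
      - 2 * ((PySem.Set.ofList s1).map (fun x => pvMinSum (pvOcc x s1) (pvOcc x s2))).sum := by
  simp only [rankDistance]
  rw [pvBuildA_eq, pvBuildA_eq, pvBuildB_keys s1]
  rw [pvLoopA (pvBuildB s1) _ (PySem.Set.nodup_ofList s1)]
  set K1 := PySem.Set.ofList s1 with hK1
  -- the leftover loop
  have hkeys : (K1.foldl PySem.Dict.erase (pvBuildB s2)).keys
      = (pvBuildB s2).keys.filter (fun x => !decide (x ∈ K1)) := by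
    show ((K1.foldl PySem.Dict.erase (pvBuildB s2)).items).map Prod.fst = _
    rw [pvEraseFold_items]
    exact pvMapFstFilter _ (fun x => !decide (x ∈ K1))
  have hgetD : ∀ x ∈ (K1.foldl PySem.Dict.erase (pvBuildB s2)).keys,
      (K1.foldl PySem.Dict.erase (pvBuildB s2)).getD x [] = pvOcc x s2 := by
    intro x hx
    rw [hkeys] at hx
    have : x ∉ K1 := by simpa using (List.mem_filter.mp hx).2
    rw [pvEraseFold_getD _ _ _ this, pvBuildB_getD]
  have hfin : ∀ (acc : Int), ∀ x ∈ (K1.foldl PySem.Dict.erase (pvBuildB s2)).keys,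
      pvSumInto acc ((K1.foldl PySem.Dict.erase (pvBuildB s2)).getD x [])
        = acc + (pvOcc x s2).sum := by
    intro acc x hx
    rw [pvSumInto_eq, hgetD x hx]
  rw [PySem.List.foldl_congr_mem _ _ _ _ hfin, PySem.List.foldl_add, hkeys, pvBuildB_keys s2]
  have hmap : ∀ x ∈ K1, pvValA ((pvBuildB s1).getD x []) ((pvBuildB s2).getD x [])
      = pvValA (pvOcc x s1) (pvOcc x s2) := by
    intro x _
    rw [pvBuildB_getD, pvBuildB_getD]
  rw [List.map_congr_left hmap, pvValA_sum K1 (fun x => pvOcc x s1) (fun x => pvOcc x s2)]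
  rw [List.map_append, List.sum_append]
  ring

-- the occurrence list of the empty sequence
theorem pvOcc_nil (c : Int) : pvOcc c [] = [] := by
  simp [pvOcc, PySem.List.enumerate]

-- a nodup map-sum changes only at one element
theorem pvSum_update_spike (L : List Int) (y : Int) (f g : Int → Int) (hnd : L.Nodup) (hy : y ∈ L)
    (hfg : ∀ x ∈ L, x ≠ y → g x = f x) :
    (L.map g).sum = (L.map f).sum + (g y - f y) := by
  induction L with
  | nil => simp at hy
  | cons a t ih =>
      rcases List.mem_cons.mp hy with rfl | hm
      · have hz : ∀ x ∈ t, g x = f x := by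
          intro x hx
          exact hfg x (by simp [hx]) (fun e => (List.nodup_cons.mp hnd).1 (e ▸ hx))
        simp only [List.map_cons, List.sum_cons, List.map_congr_left hz]
        ring
      · have hne : a ≠ y := fun e => (List.nodup_cons.mp hnd).1 (e ▸ hm)
        simp only [List.map_cons, List.sum_cons,
          ih (List.nodup_cons.mp hnd).2 hm (fun x hx hxy => hfg x (by simp [hx]) hxy),
          hfg a (by simp) hne]
        ring

-- B's single pass: loop invariant
theorem pvLoopB (s1 : List Int) (L : List Int) (hnd : L.Nodup) :
    ∀ (s : List Int), (∀ y ∈ s, y ∈ L) → ∀ (t : Int),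
      ((PySem.List.enumerate s).foldl (pvStepB (pvBuildB s1)) (PySem.Dict.empty, t)) =
        (s.foldl (fun d x => d.insert x (d.getD x 0 + 1)) PySem.Dict.empty,
         t - 2 * (L.map (fun x => pvMinSum (pvOcc x s1) (pvOcc x s))).sum) := by
  intro s
  induction s using List.reverseRecOn with
  | nil =>
      intro _ t
      have hz : ∀ x ∈ L, pvMinSum (pvOcc x s1) (pvOcc x []) = 0 := by
        intro x _
        rw [pvOcc_nil, pvMinSum_nil_right]
      rw [List.map_congr_left hz]
      simp [PySem.List.enumerate]
  | append_singleton s y ih =>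
      intro hsub t
      have hyL : y ∈ L := hsub y (by simp)
      rw [PySem.List.enumerate_append, List.foldl_append,
        ih (fun z hz => hsub z (by simp [hz])) t]
      have hsum : (L.map (fun x => pvMinSum (pvOcc x s1) (pvOcc x (s ++ [y])))).sum
          = (L.map (fun x => pvMinSum (pvOcc x s1) (pvOcc x s))).sum
            + (if s.count y < (pvOcc y s1).length
                then min ((pvOcc y s1).getD (s.count y) 0) ((s.length : Int) + 1) else 0) := by
        have hfg : ∀ x ∈ L, x ≠ y →
            pvMinSum (pvOcc x s1) (pvOcc x (s ++ [y])) = pvMinSum (pvOcc x s1) (pvOcc x s) := by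
          intro x hx hxy
          rw [pvOcc_append x y s, if_neg (fun e => hxy e.symm), List.append_nil]
        have hstep := pvSum_update_spike L y
          (fun x => pvMinSum (pvOcc x s1) (pvOcc x s))
          (fun x => pvMinSum (pvOcc x s1) (pvOcc x (s ++ [y]))) hnd hyL hfg
        beta_reduce at hstep
        rw [hstep, pvOcc_append y y s, if_pos rfl, pvMinSum_append_right, pvOcc_length]
        ring
      simp only [PySem.List.enumerate, List.foldl_cons, List.foldl_nil, pvStepB]
      rw [PySem.Dict.getD_foldl_insert_add_one s PySem.Dict.empty y]
      rw [pvBuildB_getD s1 y]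
      simp only [PySem.Dict.getD_empty, zero_add, PySem.List.len_eq, pvOcc_length, zero_add]
      rw [List.foldl_append, List.foldl_cons, List.foldl_nil, hsum]
      by_cases h : s.count y < s1.count y
      · rw [if_pos (by exact_mod_cast h), if_pos (by rw [pvOcc_length]; exact h)]
        rw [PySem.List.pyGetD_natCast]
        simp only [Prod.mk.injEq]
        exact ⟨by rw [PySem.Dict.getD_foldl_insert_add_one]; simp, by ring⟩
      · rw [if_neg (by exact_mod_cast h), if_neg (by rw [pvOcc_length]; exact h)]
        simp only [Prod.mk.injEq]
        exact ⟨by rw [PySem.Dict.getD_foldl_insert_add_one]; simp, by ring⟩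

theorem pvB_eq (s1 s2 : List Int) :
    rankDistance_alt s1 s2 =
      pvTri s1.length + pvTri s2.length
      - 2 * ((PySem.Set.ofList s2).map (fun x => pvMinSum (pvOcc x s1) (pvOcc x s2))).sum := by
  simp only [rankDistance_alt, PySem.List.len_eq]
  rw [pvLoopB s1 (PySem.Set.ofList s2) (PySem.Set.nodup_ofList s2) s2
      (fun y hy => (PySem.Set.mem_ofList s2 y).mpr hy)]
  rw [pvTri_floordiv s1.length, pvTri_floordiv s2.length]

-- a map-sum over a nodup list only depends on where the function is non-zero
theorem pvSum_filter_support (L : List Int) (f : Int → Int) (p : Int → Bool)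
    (h : ∀ x ∈ L, p x = false → f x = 0) :
    ((L.filter p).map f).sum = (L.map f).sum := by
  induction L with
  | nil => simp
  | cons a t ih =>
      have iht := ih (fun x hx => h x (by simp [hx]))
      by_cases hp : p a
      · simp [hp, iht]
      · simp only [List.filter_cons, Bool.eq_false_iff.mpr hp]
        simp [iht, h a (by simp) (by simpa using hp)]

-- the min-sums over ofList s1 and over ofList s2 agree
theorem pvMinSum_sets (s1 s2 : List Int) :
    ((PySem.Set.ofList s1).map (fun x => pvMinSum (pvOcc x s1) (pvOcc x s2))).sum =
      ((PySem.Set.ofList s2).map (fun x => pvMinSum (pvOcc x s1) (pvOcc x s2))).sum := by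
  set f := fun x => pvMinSum (pvOcc x s1) (pvOcc x s2) with hf
  set p := fun x => decide (x ∈ s1) && decide (x ∈ s2) with hp
  have hvan : ∀ x, p x = false → f x = 0 := by
    intro x hx
    rcases Bool.and_eq_false_iff.mp hx with h1 | h1
    · rw [hf]; simp only []
      rw [pvOcc_eq_nil_of_not_mem x s1 (by simpa using h1), pvMinSum_nil_left]
    · rw [hf]; simp only []
      rw [pvOcc_eq_nil_of_not_mem x s2 (by simpa using h1), pvMinSum_nil_right]
  rw [← pvSum_filter_support (PySem.Set.ofList s1) f p (fun x _ => hvan x),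
    ← pvSum_filter_support (PySem.Set.ofList s2) f p (fun x _ => hvan x)]
  have hperm : ((PySem.Set.ofList s1).filter p).Perm ((PySem.Set.ofList s2).filter p) := by
    rw [List.perm_ext_iff_of_nodup (List.Nodup.filter p (PySem.Set.nodup_ofList s1))
      (List.Nodup.filter p (PySem.Set.nodup_ofList s2))]
    intro a
    constructor
    · intro ha
      have h2 := (List.mem_filter.mp ha).2
      have hm : a ∈ s1 ∧ a ∈ s2 := by simpa [hp] using h2
      exact List.mem_filter.mpr ⟨(PySem.Set.mem_ofList s2 a).mpr hm.2, h2⟩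
    · intro ha
      have h2 := (List.mem_filter.mp ha).2
      have hm : a ∈ s1 ∧ a ∈ s2 := by simpa [hp] using h2
      exact List.mem_filter.mpr ⟨(PySem.Set.mem_ofList s1 a).mpr hm.1, h2⟩
  exact (hperm.map f).sum_eq

-- ===== VERDICT (by name: the statement is the Claim_ definition above) =====
theorem rankDistance_spec : Claim_equal_rankDistance := by
  intro s1 s2 _
  unfold Spec_rankDistance
  rw [pvA_eq, pvB_eq, pvMinSum_sets]
  have h1 : ((PySem.Set.ofList s1).map (fun x => (pvOcc x s1).sum)).sum = pvTri s1.length :=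
    pvSumOcc s1 _ (PySem.Set.nodup_ofList s1) (fun y hy => (PySem.Set.mem_ofList s1 y).mpr hy)
  have h2 : ((PySem.Set.ofList s1 ++ (PySem.Set.ofList s2).filter
      (fun x => !decide (x ∈ PySem.Set.ofList s1))).map (fun x => (pvOcc x s2).sum)).sum
      = pvTri s2.length := by
    apply pvSumOcc
    · refine List.Nodup.append (PySem.Set.nodup_ofList s1)
        (List.Nodup.filter _ (PySem.Set.nodup_ofList s2)) ?_
      intro x hx1 hx2
      exact (by simpa using (List.mem_filter.mp hx2).2 : x ∉ PySem.Set.ofList s1) hx1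
    · intro y hy
      by_cases h : y ∈ PySem.Set.ofList s1
      · exact List.mem_append.mpr (Or.inl h)
      · refine List.mem_append.mpr (Or.inr (List.mem_filter.mpr ⟨?_, by simpa using h⟩))
        exact (PySem.Set.mem_ofList s2 y).mpr hy
  rw [h1, h2]
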